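-- pv_equiv track=rewrite | github.com/MrBrantCode/unitest_baseline | mut_generate/mist_train_taco/taco_6870/solution.py | count_spiral_turns
-- ===== SOURCE A (Python) =====
-- def count_spiral_turns(x: int, y: int) -> int:
--     if x == 0 and y == 0:
--         return 0
--
--     current_x = 0
--     current_y = 0
--     step = 1
--     direction = 0
--     turns = 0
--
--     while current_x != x or current_y != y:
--         if direction == 0:
--             for _ in range(step):
--                 current_x += 1
--                 if current_x == x and current_y == y:
--                     return turns
--             direction = 1
--             turns += 1
--         elif direction == 1:
--             for _ in range(step):
--                 current_y += 1
--                 if current_x == x and current_y == y: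
--                     return turns
--             direction = 2
--             step += 1
--             turns += 1
--         elif direction == 2:
--             for _ in range(step):
--                 current_x -= 1
--                 if current_x == x and current_y == y:
--                     return turns
--             direction = 3
--             turns += 1
--         else:
--             for _ in range(step):
--                 current_y -= 1
--                 if current_x == x and current_y == y:
--                     return turns
--             direction = 0
--             step += 1
--             turns += 1
--
--     return turns
-- ===== SOURCE B (Python) =====
-- def count_spiral_turns(x: int, y: int) -> int:
--     # Closed form: locate (x, y) on its spiral segment; the turn count is the
--     # 0-based index of that segment.
--     if x == 0 and y == 0:
--         return 0
--     if x > 0 and 1 - x < y <= x:      # right edge of ring x (upward segment)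
--         return 4 * x - 3
--     if y > 0 and -y <= x < y:         # top edge of ring y (leftward segment)
--         return 4 * y - 2
--     if x < 0 and x <= y < -x:         # left edge of ring -x (downward segment)
--         return -4 * x - 1
--     return -4 * y                      # bottom edge (rightward segment), y <= 0
-- ===== Notes on version B (the rewrite author's own statement) =====
-- stated objective: faster
-- what changed: Replaced the unit-step spiral walk simulation with an O(1) closed form that classifies (x,y) onto its spiral segment (right/up/left/down edge of its ring) and computes the segment index arithmetically.
import Mathlib
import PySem

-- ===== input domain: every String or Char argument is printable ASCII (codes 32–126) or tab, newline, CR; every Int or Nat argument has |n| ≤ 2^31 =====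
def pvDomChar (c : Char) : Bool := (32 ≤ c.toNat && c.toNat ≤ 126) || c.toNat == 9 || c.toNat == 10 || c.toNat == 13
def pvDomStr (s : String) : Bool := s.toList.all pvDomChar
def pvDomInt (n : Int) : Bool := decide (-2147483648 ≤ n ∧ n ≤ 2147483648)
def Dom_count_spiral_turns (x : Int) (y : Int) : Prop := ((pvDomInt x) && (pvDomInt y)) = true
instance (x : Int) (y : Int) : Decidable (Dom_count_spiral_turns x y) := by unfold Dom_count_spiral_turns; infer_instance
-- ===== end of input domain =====

-- B replaces A's step-by-step spiral walk (one unit move at a time until (x,y) is hit)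
-- by a closed form that reads the index of the spiral segment containing (x,y)
-- directly off the coordinates.

-- ===== PORT A =====
-- A's four inner `for _ in range(step)` loops, one helper each; `.inl t` models the
-- early `return turns`, `.inr c` the fall-through with the updated coordinate.
def csInner0 (cnt : Nat) (cx cy x y t : Int) : Sum Int Int :=
  match cnt with
  | 0 => .inr cx
  | k + 1 => if cx + 1 = x ∧ cy = y then .inl t else csInner0 k (cx + 1) cy x y t
def csInner1 (cnt : Nat) (cx cy x y t : Int) : Sum Int Int :=
  match cnt with
  | 0 => .inr cy
  | k + 1 => if cx = x ∧ cy + 1 = y then .inl t else csInner1 k cx (cy + 1) x y t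
def csInner2 (cnt : Nat) (cx cy x y t : Int) : Sum Int Int :=
  match cnt with
  | 0 => .inr cx
  | k + 1 => if cx - 1 = x ∧ cy = y then .inl t else csInner2 k (cx - 1) cy x y t
def csInner3 (cnt : Nat) (cx cy x y t : Int) : Sum Int Int :=
  match cnt with
  | 0 => .inr cy
  | k + 1 => if cx = x ∧ cy - 1 = y then .inl t else csInner3 k cx (cy - 1) x y t
def csLoop (fuel : Nat) (cx cy step dir turns x y : Int) : Int :=
  match fuel with
  | 0 => turns
  | f + 1 =>
    if cx = x ∧ cy = y then turns
    else if dir = 0 then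
      match csInner0 step.toNat cx cy x y turns with
      | .inl t => t
      | .inr cx' => csLoop f cx' cy step 1 (turns + 1) x y
    else if dir = 1 then
      match csInner1 step.toNat cx cy x y turns with
      | .inl t => t
      | .inr cy' => csLoop f cx cy' (step + 1) 2 (turns + 1) x y
    else if dir = 2 then
      match csInner2 step.toNat cx cy x y turns with
      | .inl t => t
      | .inr cx' => csLoop f cx' cy step 3 (turns + 1) x y
    else
      match csInner3 step.toNat cx cy x y turns with
      | .inl t => t
      | .inr cy' => csLoop f cx cy' (step + 1) 0 (turns + 1) x y

def count_spiral_turns (x : Int) (y : Int) : Int :=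
  if x = 0 ∧ y = 0 then 0
  else csLoop 1099511627776 0 0 1 0 0 x y
-- fuel 2^40 only totalises the while-loop: on Dom the target is reached in at most
-- 4*2^31+4 outer iterations (the proof below never uses the fuel bound itself).

-- ===== PORT B =====
def count_spiral_turns_alt (x : Int) (y : Int) : Int :=
  if x = 0 ∧ y = 0 then 0
  else if 0 < x ∧ 1 - x < y ∧ y ≤ x then 4 * x - 3
  else if 0 < y ∧ -y ≤ x ∧ x < y then 4 * y - 2
  else if x < 0 ∧ x ≤ y ∧ y < -x then -4 * x - 1
  else -4 * y

-- ===== PRECONDITION & SPEC =====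
def Spec_count_spiral_turns (x : Int) (y : Int) (out : Int) : Prop := out = count_spiral_turns_alt x y
instance (x : Int) (y : Int) (out : Int) : Decidable (Spec_count_spiral_turns x y out) := by unfold Spec_count_spiral_turns; infer_instance

-- ===== CLAIM (what is proved, stated in full; the proofs are below) =====
def Claim_equal_count_spiral_turns : Prop := ∀ (x : Int) (y : Int), Dom_count_spiral_turns x y → Spec_count_spiral_turns x y (count_spiral_turns x y)

-- ===== LEMMAS AND PROOFS =====

lemma csInner0_eq (cnt : Nat) : ∀ (cx cy x y t : Int),
    csInner0 cnt cx cy x y t =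
      if cy = y ∧ cx < x ∧ x ≤ cx + cnt then .inl t else .inr (cx + cnt) := by
  induction cnt with
  | zero => intro cx cy x y t; simp only [csInner0, Nat.cast_zero, add_zero]
            rw [if_neg]; rintro ⟨_, h1, h2⟩; omega
  | succ k ih =>
      intro cx cy x y t
      simp only [csInner0, ih, Nat.cast_add, Nat.cast_one]
      split_ifs <;> first | rfl | (exfalso; omega) | (congr 1; omega)
lemma csInner1_eq (cnt : Nat) : ∀ (cx cy x y t : Int),
    csInner1 cnt cx cy x y t =
      if cx = x ∧ cy < y ∧ y ≤ cy + cnt then .inl t else .inr (cy + cnt) := by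
  induction cnt with
  | zero => intro cx cy x y t; simp only [csInner1, Nat.cast_zero, add_zero]
            rw [if_neg]; rintro ⟨_, h1, h2⟩; omega
  | succ k ih =>
      intro cx cy x y t
      simp only [csInner1, ih, Nat.cast_add, Nat.cast_one]
      split_ifs <;> first | rfl | (exfalso; omega) | (congr 1; omega)
lemma csInner2_eq (cnt : Nat) : ∀ (cx cy x y t : Int),
    csInner2 cnt cx cy x y t =
      if cy = y ∧ cx - cnt ≤ x ∧ x < cx then .inl t else .inr (cx - cnt) := by
  induction cnt with
  | zero => intro cx cy x y t; simp only [csInner2, Nat.cast_zero, sub_zero]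
            rw [if_neg]; rintro ⟨_, h1, h2⟩; omega
  | succ k ih =>
      intro cx cy x y t
      simp only [csInner2, ih, Nat.cast_add, Nat.cast_one]
      split_ifs <;> first | rfl | (exfalso; omega) | (congr 1; omega)
lemma csInner3_eq (cnt : Nat) : ∀ (cx cy x y t : Int),
    csInner3 cnt cx cy x y t =
      if cx = x ∧ cy - cnt ≤ y ∧ y < cy then .inl t else .inr (cy - cnt) := by
  induction cnt with
  | zero => intro cx cy x y t; simp only [csInner3, Nat.cast_zero, sub_zero]
            rw [if_neg]; rintro ⟨_, h1, h2⟩; omega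
  | succ k ih =>
      intro cx cy x y t
      simp only [csInner3, ih, Nat.cast_add, Nat.cast_one]
      split_ifs <;> first | rfl | (exfalso; omega) | (congr 1; omega)

lemma alt_eq_iff0 (q : Nat) (x y : Int) (h0 : ¬(x = 0 ∧ y = 0)) :
    count_spiral_turns_alt x y = 4 * q ↔ y = -(q : Int) ∧ -(q : Int) < x ∧ x ≤ q + 1 := by
  unfold count_spiral_turns_alt; rw [if_neg h0]; split_ifs <;> omega
lemma alt_eq_iff1 (q : Nat) (x y : Int) (h0 : ¬(x = 0 ∧ y = 0)) :
    count_spiral_turns_alt x y = 4 * q + 1 ↔ x = (q : Int) + 1 ∧ -(q : Int) < y ∧ y ≤ q + 1 := by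
  unfold count_spiral_turns_alt; rw [if_neg h0]; split_ifs <;> omega
lemma alt_eq_iff2 (q : Nat) (x y : Int) (h0 : ¬(x = 0 ∧ y = 0)) :
    count_spiral_turns_alt x y = 4 * q + 2 ↔ y = (q : Int) + 1 ∧ -((q : Int) + 1) ≤ x ∧ x < q + 1 := by
  unfold count_spiral_turns_alt; rw [if_neg h0]; split_ifs <;> omega
lemma alt_eq_iff3 (q : Nat) (x y : Int) (h0 : ¬(x = 0 ∧ y = 0)) :
    count_spiral_turns_alt x y = 4 * q + 3 ↔ x = -((q : Int) + 1) ∧ -((q : Int) + 1) ≤ y ∧ y < q + 1 := by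
  unfold count_spiral_turns_alt; rw [if_neg h0]; split_ifs <;> omega

def startX (q r : Nat) : Int := match r with | 0 => -(q : Int) | 1 => (q : Int) + 1 | 2 => (q : Int) + 1 | _ => -((q : Int) + 1)
def startY (q r : Nat) : Int := match r with | 0 => -(q : Int) | 1 => -(q : Int) | _ => (q : Int) + 1
def stepOf (q r : Nat) : Int := match r with | 0 => 2 * q + 1 | 1 => 2 * q + 1 | _ => 2 * q + 2

lemma csLoop_correct (fuel : Nat) : ∀ (q r : Nat) (x y : Int), r < 4 → ¬(x = 0 ∧ y = 0) →
    4 * (q : Int) + r ≤ count_spiral_turns_alt x y →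
    count_spiral_turns_alt x y < 4 * (q : Int) + r + fuel →
    csLoop fuel (startX q r) (startY q r) (stepOf q r) r (4 * (q : Int) + r) x y
      = count_spiral_turns_alt x y := by
  induction fuel with
  | zero => intro q r x y hr h0 hlo hhi; exfalso; push_cast at hhi; omega
  | succ f ih =>
    intro q r x y hr h0 hlo hhi
    push_cast at hhi
    interval_cases r
    · -- r = 0, rightward segment
      have hcnt : ((2 * (q:Int) + 1).toNat : Int) = 2 * (q:Int) + 1 := by omega
      have hguard : ¬(-(q:Int) = x ∧ -(q:Int) = y) := by
        rintro ⟨hx, hy⟩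
        rcases Nat.eq_zero_or_pos q with hq | hq
        · subst hq; exact h0 ⟨by simpa using hx.symm, by simpa using hy.symm⟩
        · have hq1 : ((q - 1 : Nat) : Int) = (q : Int) - 1 := by omega
          have := (alt_eq_iff3 (q - 1) x y h0).mpr (by rw [hq1]; refine ⟨by omega, by omega, by omega⟩)
          rw [hq1] at this; omega
      by_cases hhit : y = -(q : Int) ∧ -(q : Int) < x ∧ x ≤ (q : Int) + 1
      · have hv : count_spiral_turns_alt x y = 4 * q := (alt_eq_iff0 q x y h0).mpr hhit
        simp only [csLoop, startX, startY, stepOf, Nat.cast_zero, add_zero]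
        rw [if_neg hguard, if_pos trivial]
        rw [csInner0_eq, if_pos (by refine ⟨hhit.1.symm, hhit.2.1, ?_⟩; omega)]
        exact hv.symm
      · have hv : count_spiral_turns_alt x y ≠ 4 * q := fun he => hhit ((alt_eq_iff0 q x y h0).mp he)
        have hrec := ih q 1 x y (by omega) h0 (by push_cast; omega) (by push_cast; omega)
        simp only [startX, startY, stepOf, Nat.cast_one] at hrec
        simp only [csLoop, startX, startY, stepOf, Nat.cast_zero, add_zero]
        rw [if_neg hguard, if_pos trivial]
        rw [csInner0_eq, if_neg (by rintro ⟨h1, h2, h3⟩; rw [hcnt] at h3; exact hhit ⟨h1.symm, h2, by omega⟩)]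
        rw [hcnt, show -(q:Int) + (2 * (q:Int) + 1) = (q : Int) + 1 by ring]
        exact hrec
    · -- r = 1, upward segment
      have hcnt : ((2 * (q:Int) + 1).toNat : Int) = 2 * (q:Int) + 1 := by omega
      have hguard : ¬((q:Int) + 1 = x ∧ -(q:Int) = y) := by
        rintro ⟨hx, hy⟩
        have := (alt_eq_iff0 q x y h0).mpr ⟨hy.symm, by omega, by omega⟩
        push_cast at hlo; omega
      by_cases hhit : x = (q : Int) + 1 ∧ -(q : Int) < y ∧ y ≤ (q : Int) + 1
      · have hv : count_spiral_turns_alt x y = 4 * q + 1 := (alt_eq_iff1 q x y h0).mpr hhit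
        simp only [csLoop, startX, startY, stepOf, Nat.cast_one]
        rw [if_neg hguard, if_neg (by decide : ¬((1:Int) = 0)), if_pos trivial]
        rw [csInner1_eq, if_pos (by refine ⟨hhit.1.symm, hhit.2.1, ?_⟩; omega)]
        exact hv.symm
      · have hv : count_spiral_turns_alt x y ≠ 4 * q + 1 := fun he => hhit ((alt_eq_iff1 q x y h0).mp he)
        have hrec := ih q 2 x y (by omega) h0 (by push_cast; omega) (by push_cast; omega)
        simp only [startX, startY, stepOf, Nat.cast_ofNat] at hrec
        simp only [csLoop, startX, startY, stepOf, Nat.cast_one]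
        rw [if_neg hguard, if_neg (by decide : ¬((1:Int) = 0)), if_pos trivial]
        rw [csInner1_eq, if_neg (by rintro ⟨h1, h2, h3⟩; rw [hcnt] at h3; exact hhit ⟨h1.symm, h2, by omega⟩)]
        rw [hcnt, show -(q:Int) + (2 * (q:Int) + 1) = (q : Int) + 1 by ring,
            show 2 * (q:Int) + 1 + 1 = 2 * (q:Int) + 2 by ring,
            show 4 * (q:Int) + 1 + 1 = 4 * (q:Int) + 2 by ring]
        exact hrec
    · -- r = 2, leftward segment
      have hcnt : ((2 * (q:Int) + 2).toNat : Int) = 2 * (q:Int) + 2 := by omega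
      have hguard : ¬((q:Int) + 1 = x ∧ (q:Int) + 1 = y) := by
        rintro ⟨hx, hy⟩
        have := (alt_eq_iff1 q x y h0).mpr ⟨hx.symm, by omega, by omega⟩
        push_cast at hlo; omega
      by_cases hhit : y = (q : Int) + 1 ∧ -((q : Int) + 1) ≤ x ∧ x < (q : Int) + 1
      · have hv : count_spiral_turns_alt x y = 4 * q + 2 := (alt_eq_iff2 q x y h0).mpr hhit
        simp only [csLoop, startX, startY, stepOf, Nat.cast_ofNat]
        rw [if_neg hguard, if_neg (by decide : ¬((2:Int) = 0)), if_neg (by decide : ¬((2:Int) = 1)), if_pos trivial]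
        rw [csInner2_eq, if_pos (by refine ⟨hhit.1.symm, by omega, hhit.2.2⟩)]
        exact hv.symm
      · have hv : count_spiral_turns_alt x y ≠ 4 * q + 2 := fun he => hhit ((alt_eq_iff2 q x y h0).mp he)
        have hrec := ih q 3 x y (by omega) h0 (by push_cast; omega) (by push_cast; omega)
        simp only [startX, startY, stepOf, Nat.cast_ofNat] at hrec
        simp only [csLoop, startX, startY, stepOf, Nat.cast_ofNat]
        rw [if_neg hguard, if_neg (by decide : ¬((2:Int) = 0)), if_neg (by decide : ¬((2:Int) = 1)), if_pos trivial]
        rw [csInner2_eq, if_neg (by rintro ⟨h1, h2, h3⟩; rw [hcnt] at h2; exact hhit ⟨h1.symm, by omega, h3⟩)]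
        rw [hcnt, show (q:Int) + 1 - (2 * (q:Int) + 2) = -((q : Int) + 1) by ring,
            show 4 * (q:Int) + 2 + 1 = 4 * (q:Int) + 3 by ring]
        exact hrec
    · -- r = 3, downward segment
      have hcnt : ((2 * (q:Int) + 2).toNat : Int) = 2 * (q:Int) + 2 := by omega
      have hguard : ¬(-((q:Int) + 1) = x ∧ (q:Int) + 1 = y) := by
        rintro ⟨hx, hy⟩
        have := (alt_eq_iff2 q x y h0).mpr ⟨hy.symm, by omega, by omega⟩
        push_cast at hlo; omega
      by_cases hhit : x = -((q : Int) + 1) ∧ -((q : Int) + 1) ≤ y ∧ y < (q : Int) + 1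
      · have hv : count_spiral_turns_alt x y = 4 * q + 3 := (alt_eq_iff3 q x y h0).mpr hhit
        simp only [csLoop, startX, startY, stepOf, Nat.cast_ofNat]
        rw [if_neg hguard, if_neg (by decide : ¬((3:Int) = 0)), if_neg (by decide : ¬((3:Int) = 1)),
            if_neg (by decide : ¬((3:Int) = 2))]
        rw [csInner3_eq, if_pos (by refine ⟨hhit.1.symm, by omega, hhit.2.2⟩)]
        exact hv.symm
      · have hv : count_spiral_turns_alt x y ≠ 4 * q + 3 := fun he => hhit ((alt_eq_iff3 q x y h0).mp he)
        have hrec := ih (q + 1) 0 x y (by omega) h0 (by push_cast; omega) (by push_cast; omega)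
        simp only [startX, startY, stepOf, Nat.cast_zero, Nat.cast_add, Nat.cast_one, add_zero] at hrec
        simp only [csLoop, startX, startY, stepOf, Nat.cast_ofNat]
        rw [if_neg hguard, if_neg (by decide : ¬((3:Int) = 0)), if_neg (by decide : ¬((3:Int) = 1)),
            if_neg (by decide : ¬((3:Int) = 2))]
        rw [csInner3_eq, if_neg (by rintro ⟨h1, h2, h3⟩; rw [hcnt] at h2; exact hhit ⟨h1.symm, by omega, h3⟩)]
        rw [hcnt, show (q:Int) + 1 - (2 * (q:Int) + 2) = -((q : Int) + 1) by ring,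
            show 2 * (q:Int) + 2 + 1 = 2 * ((q:Int) + 1) + 1 by ring,
            show 4 * (q:Int) + 3 + 1 = 4 * ((q:Int) + 1) + 0 by ring]
        exact hrec

lemma alt_nonneg (x y : Int) : 0 ≤ count_spiral_turns_alt x y := by
  unfold count_spiral_turns_alt; split_ifs <;> omega

-- ===== VERDICT (by name: the statement is the Claim_ definition above) =====
theorem count_spiral_turns_spec : Claim_equal_count_spiral_turns := by
  intro x y hdom
  unfold Spec_count_spiral_turns count_spiral_turns
  split_ifs with h0
  · simp [count_spiral_turns_alt, h0.1, h0.2]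
  · have hbound : count_spiral_turns_alt x y < 1099511627776 := by
      unfold Dom_count_spiral_turns pvDomInt at hdom
      simp only [Bool.and_eq_true, decide_eq_true_eq] at hdom
      unfold count_spiral_turns_alt; split_ifs <;> omega
    have h := csLoop_correct 1099511627776 0 0 x y (by omega) h0
      (by push_cast; exact alt_nonneg x y) (by push_cast; omega)
    simp only [startX, startY, stepOf, Nat.cast_zero, mul_zero, add_zero, zero_add, neg_zero] at h
    exact h
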